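-- pv_equiv track=rewrite | github.com/LeoLacana/restaurant-orders | src/analyze_log.py | days_not_frequented
-- ===== SOURCE A (Python) =====
-- def days_not_frequented(file, name):
--     all_days = set()
--     for _, _, days in file:
--         all_days.add(days)
--
--     days_frequented = set()
--     for order in file:
--         if name in order:
--             days_frequented.add(order[2])
--
--     days_not_frequented = all_days - days_frequented
--     return days_not_frequented
-- ===== SOURCE B (Python) =====
-- def days_not_frequented(file, name):
--     # brute force: a day qualifies iff no order on that day involves name
--     return {day
--             for _, _, day in file
--             if all(name not in order for order in file if order[2] == day)}
-- ===== Notes on version B (the rewrite author's own statement) =====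
-- stated objective: alternative
-- what changed: Replaces A's two accumulated sets plus a set-difference by a per-day brute-force rescan: for each day a nested pass over the whole file checks that no order on that day involves the name.
import Mathlib
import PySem

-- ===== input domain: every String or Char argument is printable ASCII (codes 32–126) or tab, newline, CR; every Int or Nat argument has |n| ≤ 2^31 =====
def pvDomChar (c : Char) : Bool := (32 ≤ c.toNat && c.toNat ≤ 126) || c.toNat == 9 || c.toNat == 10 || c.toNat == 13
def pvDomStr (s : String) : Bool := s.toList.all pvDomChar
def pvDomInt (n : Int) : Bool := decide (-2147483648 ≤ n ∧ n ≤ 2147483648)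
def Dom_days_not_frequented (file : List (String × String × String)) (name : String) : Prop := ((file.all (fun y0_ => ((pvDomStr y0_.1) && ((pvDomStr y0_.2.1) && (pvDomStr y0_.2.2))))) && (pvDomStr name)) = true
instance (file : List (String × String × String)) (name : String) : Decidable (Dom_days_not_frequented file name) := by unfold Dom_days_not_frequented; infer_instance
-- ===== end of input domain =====

-- B replaces A's two accumulated sets plus set-difference by a per-day brute-force
-- rescan of the whole file (objective: alternative; B is O(n^2) where A is O(n)).

-- `name in order` on a Python 3-tuple: equality against any component
def memb (name : String) (o : String × String × String) : Bool :=
  o.1 == name || o.2.1 == name || o.2.2 == name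

-- ===== PORT A =====
def days_not_frequented (file : List (String × String × String)) (name : String) : List String :=
  let all_days : PySem.Set String :=
    file.foldl (fun s o => PySem.Set.add s o.2.2) PySem.Set.empty
  let days_frequented : PySem.Set String :=
    file.foldl (fun s o => if memb name o then PySem.Set.add s o.2.2 else s) PySem.Set.empty
  PySem.Set.diff all_days days_frequented

-- ===== PORT B =====
def days_not_frequented_alt (file : List (String × String × String)) (name : String) : List String :=
  PySem.Set.ofList
    ((file.map (·.2.2)).filter
      (fun day => (file.filter (fun o => o.2.2 == day)).all (fun o => !memb name o)))

-- ===== PRECONDITION & SPEC =====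
def Spec_days_not_frequented (file : List (String × String × String)) (name : String) (out : List String) : Prop := out = days_not_frequented_alt file name
instance (file : List (String × String × String)) (name : String) (out : List String) : Decidable (Spec_days_not_frequented file name out) := by unfold Spec_days_not_frequented; infer_instance

-- ===== CLAIM (what is proved, stated in full; the proofs are below) =====
def Claim_equal_days_not_frequented : Prop := ∀ (file : List (String × String × String)) (name : String), Dom_days_not_frequented file name → Spec_days_not_frequented file name (days_not_frequented file name)

-- ===== LEMMAS AND PROOFS =====

-- membership in A's days_frequented loop
lemma mem_freq (name x : String) (file : List (String × String × String)) (s : PySem.Set String) :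
    x ∈ file.foldl (fun s o => if memb name o then PySem.Set.add s o.2.2 else s) s ↔
      x ∈ s ∨ ∃ o ∈ file, memb name o ∧ o.2.2 = x := by
  induction file generalizing s with
  | nil => simp
  | cons h t ih =>
    simp only [List.foldl_cons, ih]
    by_cases hp : memb name h <;> simp [hp, PySem.Set.mem_add] <;> tauto

-- set(…) of a filtered list = filter of set(…): first-occurrence dedup commutes with filter
lemma ofList_filter {α : Type} [BEq α] [LawfulBEq α] (p : α → Bool) (xs : List α) :
    PySem.Set.ofList (xs.filter p) = (PySem.Set.ofList xs).filter p := by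
  induction xs with
  | nil => rfl
  | cons x xs ih =>
    by_cases hp : p x
    · rw [List.filter_cons_of_pos hp, PySem.Set.ofList_cons, PySem.Set.ofList_cons, ih,
        List.filter_cons_of_pos hp]
      unfold PySem.Set.discard
      rw [List.filter_filter, List.filter_filter]
      congr 1
      exact List.filter_congr (fun y _ => by rw [Bool.and_comm])
    · have hp' : p x = false := by simpa using hp
      rw [List.filter_cons_of_neg (by simp [hp']), ih, PySem.Set.ofList_cons,
        List.filter_cons_of_neg (by simp [hp'])]
      unfold PySem.Set.discard
      rw [List.filter_filter]
      apply List.filter_congr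
      intro y _
      by_cases hy : p y = true
      · have hne : (y == x) = false := by
          simp only [beq_eq_false_iff_ne, ne_eq]
          rintro rfl
          rw [hy] at hp'; exact Bool.true_eq_false.mp hp'
        simp [hy, hne]
      · simp [Bool.eq_false_iff.mpr hy]

-- ===== VERDICT (by name: the statement is the Claim_ definition above) =====
theorem days_not_frequented_spec : Claim_equal_days_not_frequented := by
  intro file name _
  unfold Spec_days_not_frequented days_not_frequented days_not_frequented_alt
  dsimp only
  have hall : file.foldl (fun s o => PySem.Set.add s o.2.2) PySem.Set.empty
      = PySem.Set.ofList (file.map (·.2.2)) := by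
    rw [PySem.Set.ofList, List.foldl_map]
  rw [hall, ofList_filter]
  unfold PySem.Set.diff
  apply List.filter_congr
  intro x _
  have hc : (file.foldl (fun s o => if memb name o then PySem.Set.add s o.2.2 else s)
      PySem.Set.empty).contains x = file.any (fun o => memb name o && o.2.2 == x) := by
    rw [Bool.eq_iff_iff, PySem.Set.contains_iff, mem_freq, List.any_eq_true]
    simp [PySem.Set.empty]
  rw [hc, Bool.eq_iff_iff]
  simp only [Bool.not_eq_eq_eq_not, Bool.not_true, List.any_eq_false, List.all_eq_true,
    List.mem_filter, Bool.and_eq_true, beq_iff_eq]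
  constructor
  · rintro h o ⟨ho, hd⟩
    exact Bool.eq_false_iff.mpr (fun hm => (h o ho) ⟨hm, hd⟩)
  · intro h o ho
    by_cases hm : memb name o = true
    · by_cases hd : o.2.2 = x
      · exact absurd hm (by simpa using h o ⟨ho, hd⟩)
      · simp [hm, hd]
    · simp [Bool.eq_false_iff.mpr hm]
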